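-- pv_equiv track=rewrite | github.com/backscatterdk/linkedkin_scraper | linkedin_recruiter_search.py | remove_https_transaction
-- ===== SOURCE A (Python) =====
-- def remove_https_transaction(text):
--     # Removes invalid bytes from http transaction data.
--     temp = []
--     is_http_transaction = True
--     for batch in text.split('hex_encoded_bytes =')[1:]:
--         if not is_http_transaction:
--             # add batch to final string.
--             temp.append(batch)
--
--         if 'HTTP_TRANSACTION_READ_BODY' in batch:
--             is_http_transaction = True
--         else:
--             is_http_transaction = False
--     text = 'hex_encoded_bytes ='.join(temp)
--     return text
-- ===== SOURCE B (Python) =====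
-- def remove_https_transaction(text):
--     batches = text.split('hex_encoded_bytes =')[1:]
--     temp = [b for prev, b in zip(batches, batches[1:])
--             if 'HTTP_TRANSACTION_READ_BODY' not in prev]
--     return 'hex_encoded_bytes ='.join(temp)
-- ===== Notes on version B (the rewrite author's own statement) =====
-- stated objective: simpler
-- what changed: Replaces A's cross-iteration boolean flag carried through the loop with a stateless pairwise lookahead: zip adjacent batches and keep a batch exactly when its predecessor lacks the HTTP_TRANSACTION_READ_BODY marker.
import Mathlib
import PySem

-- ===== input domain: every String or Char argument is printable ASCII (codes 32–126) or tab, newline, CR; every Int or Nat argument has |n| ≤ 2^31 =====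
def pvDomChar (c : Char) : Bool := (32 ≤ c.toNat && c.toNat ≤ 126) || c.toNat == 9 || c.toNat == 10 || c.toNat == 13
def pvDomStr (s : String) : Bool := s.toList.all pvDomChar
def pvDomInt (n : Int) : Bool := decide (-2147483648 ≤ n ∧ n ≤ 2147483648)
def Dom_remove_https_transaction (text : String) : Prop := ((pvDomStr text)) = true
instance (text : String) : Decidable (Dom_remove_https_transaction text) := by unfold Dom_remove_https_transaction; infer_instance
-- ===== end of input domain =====

-- B replaces A's cross-iteration boolean flag with a pairwise zip of adjacent batches (simpler).

-- ===== PORT A =====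
def remove_https_transaction (text : String) : String :=
  -- temp = []; is_http_transaction = True; for batch in text.split(...)[1:]: ...
  let batches := PySem.List.slice ((PySem.Str.split? text "hex_encoded_bytes =").getD []) (some 1) none
  let st := batches.foldl
    (fun (st : List String × Bool) batch =>
      ((if !st.2 then st.1 ++ [batch] else st.1),
       PySem.Str.isIn "HTTP_TRANSACTION_READ_BODY" batch))
    ([], true)
  PySem.Str.join "hex_encoded_bytes =" st.1

-- ===== PORT B =====
def remove_https_transaction_alt (text : String) : String :=
  let batches := PySem.List.slice ((PySem.Str.split? text "hex_encoded_bytes =").getD []) (some 1) none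
  let temp := ((batches.zip (batches.drop 1)).filter
      (fun pb => !PySem.Str.isIn "HTTP_TRANSACTION_READ_BODY" pb.1)).map (·.2)
  PySem.Str.join "hex_encoded_bytes =" temp

-- ===== PRECONDITION & SPEC =====
def Spec_remove_https_transaction (text : String) (out : String) : Prop := out = remove_https_transaction_alt text
instance (text : String) (out : String) : Decidable (Spec_remove_https_transaction text out) := by unfold Spec_remove_https_transaction; infer_instance

-- ===== CLAIM (what is proved, stated in full; the proofs are below) =====
def Claim_equal_remove_https_transaction : Prop := ∀ (text : String), Dom_remove_https_transaction text → Spec_remove_https_transaction text (remove_https_transaction text)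

-- ===== LEMMAS AND PROOFS =====

-- A's flagged fold, started with flag 'isIn marker x', equals B's zip-filter over x :: xs.
theorem rht_loop_eq (xs : List String) : ∀ (x : String) (t : List String),
    (xs.foldl
      (fun (st : List String × Bool) batch =>
        ((if !st.2 then st.1 ++ [batch] else st.1),
         PySem.Str.isIn "HTTP_TRANSACTION_READ_BODY" batch))
      (t, PySem.Str.isIn "HTTP_TRANSACTION_READ_BODY" x)).1
    = t ++ (((x :: xs).zip xs).filter
        (fun pb => !PySem.Str.isIn "HTTP_TRANSACTION_READ_BODY" pb.1)).map (·.2) := by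
  induction xs with
  | nil => intro x t; simp
  | cons y ys ih =>
    intro x t
    simp only [List.foldl_cons, List.zip_cons_cons, List.filter_cons]
    rw [ih y]
    split_ifs with h <;> simp [List.append_assoc]

-- ===== VERDICT (by name: the statement is the Claim_ definition above) =====
theorem remove_https_transaction_spec : Claim_equal_remove_https_transaction := by
  intro text _
  unfold Spec_remove_https_transaction remove_https_transaction remove_https_transaction_alt
  cases hb : PySem.List.slice ((PySem.Str.split? text "hex_encoded_bytes =").getD []) (some 1) none with
  | nil => simp
  | cons x xs =>
    simp only [List.foldl_cons, List.drop_succ_cons, List.drop_zero]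
    rw [show (if (!true) = true then ([] : List String) ++ [x] else []) = [] from rfl]
    rw [rht_loop_eq xs x []]
    simp
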